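-- pv_equiv track=rewrite | github.com/ahussain15/AI | 02 Crossword Puzzles/part3.py | fragments
-- ===== SOURCE A (Python) =====
-- def fragments(word, frags):
--     lets = [[word[k], "-"] for k in range(len(word))]
--     if len(word) == 3:
--         for a in range(2):
--             for b in range(2):
--                 for c in range(2):
--                     if lets[0][a] + lets[1][b] + lets[2][c] not in frags:
--                         frags[lets[0][a] + lets[1][b] + lets[2][c]] = 0
--                     frags[lets[0][a] + lets[1][b] + lets[2][c]] += 1
--     if len(word) == 4:
--         for a in range(2):
--             for b in range(2):
--                 for c in range(2):
--                     for d in range(2):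
--                         if lets[0][a] + lets[1][b] + lets[2][c] + lets[3][d] not in frags:
--                             frags[lets[0][a] + lets[1][b] + lets[2][c] + lets[3][d]] = 0
--                         frags[lets[0][a] + lets[1][b] + lets[2][c] + lets[3][d]] += 1
--     if len(word) == 5:
--         for a in range(2):
--             for b in range(2):
--                 for c in range(2):
--                     for d in range(2):
--                         for e in range(2):
--                             if lets[0][a] + lets[1][b] + lets[2][c] + lets[3][d]+lets[4][e] not in frags:
--                                 frags[lets[0][a] + lets[1][b] + lets[2][c] + lets[3][d]+lets[4][e]] = 0
--                             frags[lets[0][a] + lets[1][b] + lets[2][c] + lets[3][d]+lets[4][e]] += 1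
--     return frags
-- ===== SOURCE B (Python) =====
-- def fragments(word, frags):
--     if len(word) not in (3, 4, 5):
--         return frags
--     masks = [""]
--     for ch in word:
--         masks = [m + x for m in masks for x in (ch, "-")]
--     for m in masks:
--         frags[m] = frags.get(m, 0) + 1
--     return frags
-- ===== Notes on version B (the rewrite author's own statement) =====
-- stated objective: simpler
-- what changed: Replaces the three copies of length-specific nested range(2) loops with one iterative prefix-extension pass that builds the full mask list for any of the lengths 3/4/5, then a single counting loop over that list.
import Mathlib
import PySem

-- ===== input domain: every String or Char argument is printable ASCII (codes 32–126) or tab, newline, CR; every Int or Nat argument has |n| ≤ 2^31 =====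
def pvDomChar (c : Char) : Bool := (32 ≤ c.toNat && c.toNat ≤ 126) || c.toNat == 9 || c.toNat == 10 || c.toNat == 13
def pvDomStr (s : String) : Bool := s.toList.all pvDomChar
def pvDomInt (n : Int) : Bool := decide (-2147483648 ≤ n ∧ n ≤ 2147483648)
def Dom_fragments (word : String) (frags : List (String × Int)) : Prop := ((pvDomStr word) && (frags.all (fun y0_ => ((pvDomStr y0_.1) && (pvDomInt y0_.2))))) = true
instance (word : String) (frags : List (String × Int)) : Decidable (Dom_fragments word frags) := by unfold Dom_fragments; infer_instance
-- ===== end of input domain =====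

-- B replaces A's three length-specific blocks of nested range(2) loops by one uniform
-- prefix-extension pass building the mask list, then a single counting loop (objective: simpler).
-- A mutates the passed-in dict in place and returns it; B performs the same mutation; the
-- equivalence proved here is about the returned association list.


-- ===== PORT A =====
-- the body of A's innermost loop: `if key not in frags: frags[key] = 0; frags[key] += 1`
def aStep (d : PySem.Dict String Int) (k : String) : PySem.Dict String Int :=
  let d1 := if d.contains k then d else d.insert k 0
  d1.insert k (d1.getD k 0 + 1)

def fragments (word : String) (frags : List (String × Int)) : List (String × Int) :=
  let cs := word.toList
  -- lets = [[word[k], "-"] for k in range(len(word))]  (index loop over all valid indices = map)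
  let lets : List (List String) := cs.map (fun c => [String.ofList [c], "-"])
  let L : Nat → Nat → String := fun i a => (lets.getD i []).getD a ""
  let n := cs.length
  let d0 := PySem.Dict.mk frags
  -- range(2) is the literal list [0, 1]
  let d1 := if n = 3 then
      [0, 1].foldl (fun d a => [0, 1].foldl (fun d b => [0, 1].foldl (fun d c =>
        aStep d (L 0 a ++ L 1 b ++ L 2 c)) d) d) d0
    else d0
  let d2 := if n = 4 then
      [0, 1].foldl (fun d a => [0, 1].foldl (fun d b => [0, 1].foldl (fun d c =>
        [0, 1].foldl (fun d dd =>
          aStep d (L 0 a ++ L 1 b ++ L 2 c ++ L 3 dd)) d) d) d) d1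
    else d1
  let d3 := if n = 5 then
      [0, 1].foldl (fun d a => [0, 1].foldl (fun d b => [0, 1].foldl (fun d c =>
        [0, 1].foldl (fun d dd => [0, 1].foldl (fun d e =>
          aStep d (L 0 a ++ L 1 b ++ L 2 c ++ L 3 dd ++ L 4 e)) d) d) d) d) d2
    else d2
  d3.items

-- ===== PORT B =====
-- masks = [""]; for ch in word: masks = [m + x for m in masks for x in (ch, "-")]
def buildMasks (cs : List Char) : List String :=
  cs.foldl (fun ms c => ms.flatMap (fun m => [m ++ String.ofList [c], m ++ "-"])) [""]

-- frags[m] = frags.get(m, 0) + 1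
def bStep (d : PySem.Dict String Int) (m : String) : PySem.Dict String Int :=
  d.insert m (d.getD m 0 + 1)

def fragments_alt (word : String) (frags : List (String × Int)) : List (String × Int) :=
  let cs := word.toList
  if cs.length = 3 ∨ cs.length = 4 ∨ cs.length = 5 then
    ((buildMasks cs).foldl bStep (PySem.Dict.mk frags)).items
  else frags

-- ===== PRECONDITION & SPEC =====
def Spec_fragments (word : String) (frags : List (String × Int)) (out : List (String × Int)) : Prop := out = fragments_alt word frags
instance (word : String) (frags : List (String × Int)) (out : List (String × Int)) : Decidable (Spec_fragments word frags out) := by unfold Spec_fragments; infer_instance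

-- ===== CLAIM (what is proved, stated in full; the proofs are below) =====
def Claim_equal_fragments : Prop := ∀ (word : String) (frags : List (String × Int)), Dom_fragments word frags → Spec_fragments word frags (fragments word frags)

-- ===== LEMMAS AND PROOFS =====

-- A's "insert 0 if absent, then increment" equals B's single get-default-and-insert.
theorem aStep_eq_bStep (d : PySem.Dict String Int) (k : String) : aStep d k = bStep d k := by
  unfold aStep bStep
  by_cases h : d.contains k
  · simp [h]
  · have hc : d.contains k = false := by simpa using h
    simp [hc, PySem.Dict.insert_insert_self, PySem.Dict.getD_insert_self,
      PySem.Dict.getD_of_not_contains d 0 hc]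

-- ===== VERDICT (by name: the statement is the Claim_ definition above) =====
theorem fragments_spec : Claim_equal_fragments := by
  intro word frags _
  unfold Spec_fragments
  rcases h : word.toList with _ | ⟨c1, _ | ⟨c2, _ | ⟨c3, _ | ⟨c4, _ | ⟨c5, _ | ⟨c6, rest⟩⟩⟩⟩⟩⟩ <;>
    simp [fragments, fragments_alt, h, buildMasks, aStep_eq_bStep,
      List.foldl, List.flatMap]
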